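-- pv_equiv track=rewrite | github.com/Nat-003/a-maze-ing | solver.py | path_to_cells
-- ===== SOURCE A (Python) =====
-- from typing import LiteralString, Any
--
-- def path_to_cells(path: LiteralString, entry: Any) -> list[tuple[Any, Any]]:
--     cells = [tuple(entry)]  # start with entry cell
--     x, y = entry
--     for direction in path:
--         if direction == 'N':
--             y -= 1
--         elif direction == 'S':
--             y += 1
--         elif direction == 'E':
--             x += 1
--         elif direction == 'W':
--             x -= 1
--         cells.append((x, y))
--     return cells
-- ===== SOURCE B (Python) =====
-- def path_to_cells(path, entry):
--     # Each cell is computed independently by a closed-form counting formula: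
--     # position after i moves = entry + (#E - #W, #S - #N) among the first i characters.
--     x, y = entry
--     return [(x + path.count('E', 0, i) - path.count('W', 0, i),
--              y + path.count('S', 0, i) - path.count('N', 0, i))
--             for i in range(len(path) + 1)]
-- ===== Notes on version B (the rewrite author's own statement) =====
-- stated objective: alternative
-- what changed: Replaces the stateful running-position loop by a per-index closed-form counting formula: cell i is entry plus (#E-#W, #S-#N) counted over the first i characters, each cell computed independently with str.count (no accumulator, O(n^2) vs A's O(n)).
import Mathlib
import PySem

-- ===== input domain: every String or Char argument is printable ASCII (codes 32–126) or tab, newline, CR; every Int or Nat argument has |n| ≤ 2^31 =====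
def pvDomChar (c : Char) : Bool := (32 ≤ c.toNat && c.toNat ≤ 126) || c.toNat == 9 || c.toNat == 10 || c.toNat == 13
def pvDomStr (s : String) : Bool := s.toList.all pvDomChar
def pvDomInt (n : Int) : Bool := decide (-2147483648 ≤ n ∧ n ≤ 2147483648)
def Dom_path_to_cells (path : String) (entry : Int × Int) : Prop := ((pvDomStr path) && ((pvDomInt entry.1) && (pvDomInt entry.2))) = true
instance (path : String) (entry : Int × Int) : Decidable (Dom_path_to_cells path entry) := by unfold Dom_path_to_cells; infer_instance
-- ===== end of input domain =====

-- B replaces A's stateful running-position loop by an independent closed-form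
-- counting formula per output index (entry + (#E-#W, #S-#N) over the prefix); alternative, not faster.

-- ===== PORT A =====
-- step-for-step port of A: accumulator holds (cells, x, y); if/elif chain in order
def path_to_cells (path : String) (entry : Int × Int) : List (Int × Int) :=
  (path.toList.foldl
    (fun (st : List (Int × Int) × Int × Int) (direction : Char) =>
      let cells := st.1
      let xy : Int × Int :=
        if direction = 'N' then (st.2.1, st.2.2 - 1)
        else if direction = 'S' then (st.2.1, st.2.2 + 1)
        else if direction = 'E' then (st.2.1 + 1, st.2.2)
        else if direction = 'W' then (st.2.1 - 1, st.2.2)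
        else (st.2.1, st.2.2)
      (cells ++ [xy], xy))
    ([(entry.1, entry.2)], entry.1, entry.2)).1

-- ===== PORT B =====
-- B: cell i computed independently as entry + (#E-#W, #S-#N) counted in path[:i]
def path_to_cells_alt (path : String) (entry : Int × Int) : List (Int × Int) :=
  let l := path.toList
  let x := entry.1
  let y := entry.2
  (List.range (l.length + 1)).map (fun i =>
    (x + ((l.take i).count 'E' : Int) - ((l.take i).count 'W' : Int),
     y + ((l.take i).count 'S' : Int) - ((l.take i).count 'N' : Int)))

-- ===== PRECONDITION & SPEC =====
def Spec_path_to_cells (path : String) (entry : Int × Int) (out : List (Int × Int)) : Prop := out = path_to_cells_alt path entry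
instance (path : String) (entry : Int × Int) (out : List (Int × Int)) : Decidable (Spec_path_to_cells path entry out) := by unfold Spec_path_to_cells; infer_instance

-- ===== CLAIM =====
def Claim_equal_path_to_cells : Prop := ∀ (path : String) (entry : Int × Int), Dom_path_to_cells path entry → Spec_path_to_cells path entry (path_to_cells path entry)

-- ===== LEMMAS AND PROOFS =====
-- invariant for A's fold: the cells component is `cells` followed by the per-index count formula
theorem pv_inv (l : List Char) (cells : List (Int × Int)) (x y : Int) :
    (l.foldl
      (fun (st : List (Int × Int) × Int × Int) (direction : Char) =>
        (st.1 ++ [if direction = 'N' then ((st.2.1, st.2.2 - 1) : Int × Int)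
          else if direction = 'S' then (st.2.1, st.2.2 + 1)
          else if direction = 'E' then (st.2.1 + 1, st.2.2)
          else if direction = 'W' then (st.2.1 - 1, st.2.2)
          else (st.2.1, st.2.2)],
         if direction = 'N' then (st.2.1, st.2.2 - 1)
          else if direction = 'S' then (st.2.1, st.2.2 + 1)
          else if direction = 'E' then (st.2.1 + 1, st.2.2)
          else if direction = 'W' then (st.2.1 - 1, st.2.2)
          else (st.2.1, st.2.2)))
      (cells ++ [(x, y)], x, y)).1 =
    cells ++ (List.range (l.length + 1)).map (fun i =>
      (x + ((l.take i).count 'E' : Int) - ((l.take i).count 'W' : Int),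
       y + ((l.take i).count 'S' : Int) - ((l.take i).count 'N' : Int))) := by
  induction l generalizing cells x y with
  | nil => simp
  | cons c rest ih =>
    simp only [List.foldl_cons]
    have hx' :
        (if c = 'N' then ((x, y - 1) : Int × Int)
         else if c = 'S' then (x, y + 1)
         else if c = 'E' then (x + 1, y)
         else if c = 'W' then (x - 1, y)
         else (x, y)) =
        ((x + ((if c = 'E' then 1 else 0 : Int)) - ((if c = 'W' then 1 else 0 : Int))),
         (y + ((if c = 'S' then 1 else 0 : Int)) - ((if c = 'N' then 1 else 0 : Int)))) := by
      by_cases hN : c = 'N' <;> by_cases hS : c = 'S' <;> by_cases hE : c = 'E' <;>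
        by_cases hW : c = 'W' <;> simp_all
    set x' : Int := x + ((if c = 'E' then 1 else 0 : Int)) - ((if c = 'W' then 1 else 0 : Int)) with hx
    set y' : Int := y + ((if c = 'S' then 1 else 0 : Int)) - ((if c = 'N' then 1 else 0 : Int)) with hy
    rw [hx', ih (cells ++ [(x, y)]) x' y']
    rw [List.append_assoc]
    congr 1
    simp only [List.singleton_append]
    conv_rhs => rw [List.range_succ_eq_map]
    simp only [List.map_cons, List.map_map]
    congr 1
    · simp
    · apply List.map_congr_left
      intro i hi
      clear ih hi
      simp only [Function.comp_apply, List.take_succ_cons, List.count_cons, Prod.mk.injEq,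
        hx, hy, beq_iff_eq, Nat.cast_add, Nat.cast_ite, Nat.cast_one, Nat.cast_zero]
      constructor <;> split_ifs <;> ring

-- ===== VERDICT =====
theorem path_to_cells_spec : Claim_equal_path_to_cells := by
  intro path entry _
  unfold Spec_path_to_cells path_to_cells path_to_cells_alt
  have := pv_inv path.toList [] entry.1 entry.2
  simpa using this
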